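-- pv_equiv track=rewrite | github.com/marcel-gle/gb-qr-tracker | scripts/snov_io_person_match.py | choose_best_email
-- ===== SOURCE A (Python) =====
-- GENERIC_EMAIL_PREFIXES = (
--     "info@",
--     "kontakt@",
--     "contact@",
--     "sales@",
--     "support@",
--     "service@",
--     "office@",
--     "mail@",
--     "hello@",
--     "admin@",
--     "noreply@",
--     "no-reply@",
--     "bewerbung@",
-- )
--
-- def is_generic_email(email: str) -> bool:
--     if not isinstance(email, str):
--         return False
--     email = email.lower()
--     return email.startswith(GENERIC_EMAIL_PREFIXES)
--
-- def choose_best_email(contacts, target_first: str, target_last: str):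
--     """
--     Choose the best email for a given person from Snov.io contacts.
--
--     Priority:
--     1. Personal: exact (or very close) first+last name match -> email_level="personal"
--     2. Enhanced: non-generic email from same domain -> email_level="enhanced"
--     3. Generic: generic email like info@... -> email_level="generic"
--     """
--     target_first = (target_first or "").strip().lower()
--     target_last = (target_last or "").strip().lower()
--
--     personal_candidates = []
--     enhanced_candidates = []
--     generic_candidates = []
--
--     for c in contacts:
--         email = c.get("email")
--         if not email:
--             continue
--         email_l = email.lower()
--         first = (c.get("first_name") or "").strip().lower()
--         last = (c.get("last_name") or "").strip().lower()
--
--         # Name match logic: exact match or last name match + same first initial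
--         name_match = False
--         if target_last:
--             if last == target_last and target_first:
--                 if first == target_first:
--                     name_match = True
--                 elif first and first[0] == target_first[0]:
--                     name_match = True
--
--         if name_match:
--             personal_candidates.append(email_l)
--         elif not is_generic_email(email_l):
--             enhanced_candidates.append(email_l)
--         else:
--             generic_candidates.append(email_l)
--
--     if personal_candidates:
--         return personal_candidates[0], "personal"
--     if enhanced_candidates:
--         return enhanced_candidates[0], "enhanced"
--     if generic_candidates:
--         return generic_candidates[0], "generic"
--     return None, None
-- ===== SOURCE B (Python) =====
-- GENERIC_EMAIL_PREFIXES = (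
--     "info@",
--     "kontakt@",
--     "contact@",
--     "sales@",
--     "support@",
--     "service@",
--     "office@",
--     "mail@",
--     "hello@",
--     "admin@",
--     "noreply@",
--     "no-reply@",
--     "bewerbung@",
-- )
--
--
-- def is_generic_email(email: str) -> bool:
--     if not isinstance(email, str):
--         return False
--     return email.lower().startswith(GENERIC_EMAIL_PREFIXES)
--
--
-- def choose_best_email(contacts, target_first: str, target_last: str):
--     """Scan contacts up to three times in priority order instead of
--     bucketing everything into three lists first."""
--     tf = (target_first or "").strip().lower()
--     tl = (target_last or "").strip().lower()
--
--     def name_matches(c):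
--         if not tl or not tf:
--             return False
--         first = (c.get("first_name") or "").strip().lower()
--         last = (c.get("last_name") or "").strip().lower()
--         if last != tl:
--             return False
--         return first == tf or (bool(first) and first[0] == tf[0])
--
--     # Pass 1: first name-matched contact with an email -> personal.
--     for c in contacts:
--         email = c.get("email")
--         if email and name_matches(c):
--             return email.lower(), "personal"
--     # Pass 2: no name match exists; first non-generic email -> enhanced.
--     for c in contacts:
--         email = c.get("email")
--         if email and not is_generic_email(email.lower()):
--             return email.lower(), "enhanced"
--     # Pass 3: every remaining email is generic; first one -> generic.
--     for c in contacts: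
--         email = c.get("email")
--         if email:
--             return email.lower(), "generic"
--     return None, None
-- ===== Notes on version B (the rewrite author's own statement) =====
-- stated objective: alternative
-- what changed: Replaces A's single pass that buckets every email into three accumulator lists with up to three short-circuiting priority passes (personal, then non-generic, then any email), each returning the first hit; no lists are built.
import Mathlib
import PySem

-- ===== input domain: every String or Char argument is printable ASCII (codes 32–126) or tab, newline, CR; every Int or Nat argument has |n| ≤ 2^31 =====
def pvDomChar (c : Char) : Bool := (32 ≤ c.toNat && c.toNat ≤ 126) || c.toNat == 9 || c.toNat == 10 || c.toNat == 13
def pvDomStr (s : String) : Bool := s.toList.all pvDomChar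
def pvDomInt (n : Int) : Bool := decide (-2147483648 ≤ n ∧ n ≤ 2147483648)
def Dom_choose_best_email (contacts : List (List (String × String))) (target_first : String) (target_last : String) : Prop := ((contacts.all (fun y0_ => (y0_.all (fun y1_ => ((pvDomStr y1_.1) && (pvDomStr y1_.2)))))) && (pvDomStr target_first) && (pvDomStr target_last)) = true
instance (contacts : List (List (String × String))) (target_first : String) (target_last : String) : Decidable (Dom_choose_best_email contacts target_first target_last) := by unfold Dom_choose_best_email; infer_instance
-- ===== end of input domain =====

-- B replaces A's one bucketing pass over three accumulator lists with up to three
-- short-circuiting priority passes, each returning the first hit (objective: alternative).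

-- ===== PORT A =====
def pvGenericPrefixes : List String :=
  ["info@", "kontakt@", "contact@", "sales@", "support@", "service@", "office@",
   "mail@", "hello@", "admin@", "noreply@", "no-reply@", "bewerbung@"]

-- is_generic_email (the isinstance check is always true for String inputs)
def pvIsGeneric (email : String) : Bool :=
  let e := PySem.Str.lower email
  pvGenericPrefixes.any (fun p => PySem.Str.startswith e p)

-- one loop iteration of A's bucketing pass (tf, tl already stripped+lowered)
def pvStepA (tf tl : String) (acc : List String × List String × List String)
    (c : List (String × String)) : List String × List String × List String :=
  match c.lookup "email" with
  | none => acc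
  | some email =>
    if email = "" then acc
    else
      let el := PySem.Str.lower email
      let first := PySem.Str.lower (PySem.Str.strip ((c.lookup "first_name").getD ""))
      let last := PySem.Str.lower (PySem.Str.strip ((c.lookup "last_name").getD ""))
      let nameMatch : Bool :=
        if tl ≠ "" then
          if last = tl ∧ tf ≠ "" then
            if first = tf then true
            else if first ≠ "" ∧ PySem.Str.pyGet? first 0 = PySem.Str.pyGet? tf 0 then true
            else false
          else false
        else false
      if nameMatch then (acc.1 ++ [el], acc.2.1, acc.2.2)
      else if ¬ pvIsGeneric el then (acc.1, acc.2.1 ++ [el], acc.2.2)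
      else (acc.1, acc.2.1, acc.2.2 ++ [el])

def choose_best_email (contacts : List (List (String × String))) (target_first : String) (target_last : String) : Option String × Option String :=
  let tf := PySem.Str.lower (PySem.Str.strip target_first)
  let tl := PySem.Str.lower (PySem.Str.strip target_last)
  let r := contacts.foldl (pvStepA tf tl) ([], [], [])
  match r.1 with
  | x :: _ => (some x, some "personal")
  | [] =>
    match r.2.1 with
    | x :: _ => (some x, some "enhanced")
    | [] =>
      match r.2.2 with
      | x :: _ => (some x, some "generic")
      | [] => (none, none)

-- ===== PORT B =====
-- name_matches from Source B (tf, tl already stripped+lowered)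
def pvNameMatches (tf tl : String) (c : List (String × String)) : Bool :=
  if tl = "" ∨ tf = "" then false
  else
    let first := PySem.Str.lower (PySem.Str.strip ((c.lookup "first_name").getD ""))
    let last := PySem.Str.lower (PySem.Str.strip ((c.lookup "last_name").getD ""))
    if last ≠ tl then false
    else (first = tf) || (first ≠ "" && (PySem.Str.pyGet? first 0 = PySem.Str.pyGet? tf 0))

-- pass 1: first contact with a truthy email that name-matches
def pvPass1 (tf tl : String) : List (List (String × String)) → Option String
  | [] => none
  | c :: cs =>
    match c.lookup "email" with
    | some email =>
      if email ≠ "" && pvNameMatches tf tl c then some (PySem.Str.lower email)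
      else pvPass1 tf tl cs
    | none => pvPass1 tf tl cs

-- pass 2: first truthy non-generic email
def pvPass2 : List (List (String × String)) → Option String
  | [] => none
  | c :: cs =>
    match c.lookup "email" with
    | some email =>
      if email ≠ "" && ¬ pvIsGeneric (PySem.Str.lower email) then some (PySem.Str.lower email)
      else pvPass2 cs
    | none => pvPass2 cs

-- pass 3: first truthy email
def pvPass3 : List (List (String × String)) → Option String
  | [] => none
  | c :: cs =>
    match c.lookup "email" with
    | some email => if email ≠ "" then some (PySem.Str.lower email) else pvPass3 cs
    | none => pvPass3 cs

def choose_best_email_alt (contacts : List (List (String × String))) (target_first : String) (target_last : String) : Option String × Option String :=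
  let tf := PySem.Str.lower (PySem.Str.strip target_first)
  let tl := PySem.Str.lower (PySem.Str.strip target_last)
  match pvPass1 tf tl contacts with
  | some e => (some e, some "personal")
  | none =>
    match pvPass2 contacts with
    | some e => (some e, some "enhanced")
    | none =>
      match pvPass3 contacts with
      | some e => (some e, some "generic")
      | none => (none, none)

-- ===== PRECONDITION & SPEC =====
def Spec_choose_best_email (contacts : List (List (String × String))) (target_first : String) (target_last : String) (out : Option String × Option String) : Prop := out = choose_best_email_alt contacts target_first target_last
instance (contacts : List (List (String × String))) (target_first : String) (target_last : String) (out : Option String × Option String) : Decidable (Spec_choose_best_email contacts target_first target_last out) := by unfold Spec_choose_best_email; infer_instance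

-- ===== CLAIM (what is proved, stated in full; the proofs are below) =====
def Claim_equal_choose_best_email : Prop := ∀ (contacts : List (List (String × String))) (target_first : String) (target_last : String), Dom_choose_best_email contacts target_first target_last → Spec_choose_best_email contacts target_first target_last (choose_best_email contacts target_first target_last)

-- ===== LEMMAS AND PROOFS =====

-- the bucket contributed by one contact, as computed by A's step from empty accumulators
def pvBuckets (tf tl : String) (cs : List (List (String × String))) :
    List String × List String × List String :=
  cs.foldl (pvStepA tf tl) ([], [], [])

-- A's step only appends; its branch tests do not depend on the accumulator
theorem stepA_append (tf tl : String) (acc : List String × List String × List String)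
    (c : List (String × String)) :
    pvStepA tf tl acc c =
      (acc.1 ++ (pvStepA tf tl ([], [], []) c).1,
       acc.2.1 ++ (pvStepA tf tl ([], [], []) c).2.1,
       acc.2.2 ++ (pvStepA tf tl ([], [], []) c).2.2) := by
  unfold pvStepA
  cases c.lookup "email" with
  | none => simp
  | some email => dsimp only; split_ifs <;> simp

theorem foldl_stepA (tf tl : String) (cs : List (List (String × String)))
    (p e g : List String) :
    cs.foldl (pvStepA tf tl) (p, e, g) =
      (p ++ (pvBuckets tf tl cs).1, e ++ (pvBuckets tf tl cs).2.1, g ++ (pvBuckets tf tl cs).2.2) := by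
  induction cs generalizing p e g with
  | nil => simp [pvBuckets]
  | cons c cs ih =>
    show (cs.foldl (pvStepA tf tl) (pvStepA tf tl (p, e, g) c)) = _
    rw [stepA_append]
    rw [ih]
    have hb : pvBuckets tf tl (c :: cs) =
        ((pvStepA tf tl ([], [], []) c).1 ++ (pvBuckets tf tl cs).1,
         (pvStepA tf tl ([], [], []) c).2.1 ++ (pvBuckets tf tl cs).2.1,
         (pvStepA tf tl ([], [], []) c).2.2 ++ (pvBuckets tf tl cs).2.2) := by
      show cs.foldl (pvStepA tf tl) (pvStepA tf tl ([], [], []) c) = _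
      rw [stepA_append]; rw [ih]
    rw [hb]; simp

-- per-contact bucket contribution, phrased with Source B's predicates
theorem stepA_empty (tf tl : String) (c : List (String × String)) :
    pvStepA tf tl ([], [], []) c =
      (match c.lookup "email" with
       | none => (([] : List String), ([] : List String), ([] : List String))
       | some email =>
         if email = "" then ([], [], [])
         else if pvNameMatches tf tl c then ([PySem.Str.lower email], [], [])
         else if ¬ pvIsGeneric (PySem.Str.lower email) then ([], [PySem.Str.lower email], [])
         else ([], [], [PySem.Str.lower email])) := by
  unfold pvStepA pvNameMatches
  cases c.lookup "email" with
  | none => rfl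
  | some email =>
    dsimp only
    split_ifs <;> simp_all

theorem buckets_cons (tf tl : String) (c : List (String × String))
    (cs : List (List (String × String))) :
    pvBuckets tf tl (c :: cs) =
      ((pvStepA tf tl ([], [], []) c).1 ++ (pvBuckets tf tl cs).1,
       (pvStepA tf tl ([], [], []) c).2.1 ++ (pvBuckets tf tl cs).2.1,
       (pvStepA tf tl ([], [], []) c).2.2 ++ (pvBuckets tf tl cs).2.2) := by
  show cs.foldl (pvStepA tf tl) (pvStepA tf tl ([], [], []) c) = _
  rw [foldl_stepA]

-- pass 1 returns the head of A's personal bucket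
theorem pass1_eq (tf tl : String) (cs : List (List (String × String))) :
    pvPass1 tf tl cs = (pvBuckets tf tl cs).1.head? := by
  induction cs with
  | nil => simp [pvPass1, pvBuckets]
  | cons c cs ih =>
    rw [buckets_cons, stepA_empty]
    unfold pvPass1
    cases hE : c.lookup "email" with
    | none => simpa using ih
    | some email =>
      by_cases h0 : email = ""
      · simpa [h0] using ih
      · by_cases hm : pvNameMatches tf tl c
        · simp [h0, hm]
        · by_cases hg : pvIsGeneric (PySem.Str.lower email) <;>
            simpa [h0, hm, hg] using ih

-- with no personal candidate, pass 2 returns the head of A's enhanced bucket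
theorem pass2_eq (tf tl : String) (cs : List (List (String × String)))
    (hP : (pvBuckets tf tl cs).1 = []) :
    pvPass2 cs = (pvBuckets tf tl cs).2.1.head? := by
  induction cs with
  | nil => simp [pvPass2, pvBuckets]
  | cons c cs ih =>
    rw [buckets_cons, stepA_empty] at hP ⊢
    unfold pvPass2
    cases hE : c.lookup "email" with
    | none =>
      rw [hE] at hP; simp at hP
      simpa using ih hP
    | some email =>
      rw [hE] at hP
      by_cases h0 : email = ""
      · simp [h0] at hP
        simpa [h0] using ih hP
      · by_cases hm : pvNameMatches tf tl c
        · simp [h0, hm] at hP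
        · by_cases hg : pvIsGeneric (PySem.Str.lower email)
          · simp [h0, hm, hg] at hP
            simpa [h0, hm, hg] using ih hP
          · simp [h0, hm, hg]

-- with no personal and no enhanced candidate, pass 3 returns the head of A's generic bucket
theorem pass3_eq (tf tl : String) (cs : List (List (String × String)))
    (hP : (pvBuckets tf tl cs).1 = []) (hE2 : (pvBuckets tf tl cs).2.1 = []) :
    pvPass3 cs = (pvBuckets tf tl cs).2.2.head? := by
  induction cs with
  | nil => simp [pvPass3, pvBuckets]
  | cons c cs ih =>
    rw [buckets_cons, stepA_empty] at hP hE2 ⊢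
    unfold pvPass3
    cases hE : c.lookup "email" with
    | none =>
      rw [hE] at hP hE2; simp at hP hE2
      simpa using ih hP hE2
    | some email =>
      rw [hE] at hP hE2
      by_cases h0 : email = ""
      · simp [h0] at hP hE2
        simpa [h0] using ih hP hE2
      · by_cases hm : pvNameMatches tf tl c
        · simp [h0, hm] at hP
        · by_cases hg : pvIsGeneric (PySem.Str.lower email)
          · simp [h0, hm, hg]
          · simp [h0, hm, hg] at hE2

-- ===== VERDICT (by name: the statement is the Claim_ definition above) =====
theorem choose_best_email_spec : Claim_equal_choose_best_email := by
  intro contacts target_first target_last _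
  unfold Spec_choose_best_email choose_best_email choose_best_email_alt
  simp only []
  set tf := PySem.Str.lower (PySem.Str.strip target_first)
  set tl := PySem.Str.lower (PySem.Str.strip target_last)
  rw [show contacts.foldl (pvStepA tf tl) ([], [], []) = pvBuckets tf tl contacts from rfl]
  rw [pass1_eq]
  cases hp : (pvBuckets tf tl contacts).1 with
  | cons x xs => simp
  | nil =>
    simp only [List.head?_nil]
    rw [pass2_eq tf tl contacts hp]
    cases he : (pvBuckets tf tl contacts).2.1 with
    | cons x xs => simp
    | nil =>
      simp only [List.head?_nil]
      rw [pass3_eq tf tl contacts hp he]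
      cases hg : (pvBuckets tf tl contacts).2.2 <;> simp
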